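-- pv_equiv track=rewrite | github.com/alertjjm/Python_Practice | ETC/smallstring.py | solution
-- ===== SOURCE A (Python) =====
-- def solution(ipt):
--     leftresult=[]
--     rightresult=[]
--     middle=ipt
--     left=0
--     right=len(ipt)-1
--     st=True
--     while(st):
--         t=False
--         for i in range(1,len(middle)//2+1):
--             lt=middle[:i]
--             rt=middle[len(middle)-i:]
--             if(lt==rt):
--                 leftresult=leftresult+[lt]
--                 rightresult=[rt]+rightresult
--                 middle=middle[i:len(middle)-i]
--                 t=True
--                 break
--         if(t==False and len(middle)>0):
--             return leftresult+[middle]+rightresult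
--         elif(t==False):
--             return leftresult+rightresult
-- ===== SOURCE B (Python) =====
-- def solution(ipt):
--     n = len(ipt)
--     MOD = 1000000007
--     BASE = 131
--     # rolling-hash prefix tables over the whole input, computed once
--     h = [0]
--     p = [1]
--     for ch in ipt:
--         h.append((h[-1] * BASE + ord(ch)) % MOD)
--         p.append((p[-1] * BASE) % MOD)
--
--     def hs(a, b):
--         return (h[b] - h[a] * p[b - a]) % MOD
--
--     left = []
--     right = []
--     lo, hi = 0, n
--     while True:
--         found = 0
--         for i in range(1, (hi - lo) // 2 + 1):
--             if hs(lo, lo + i) == hs(hi - i, hi) and ipt[lo:lo + i] == ipt[hi - i:hi]: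
--                 found = i
--                 break
--         if found == 0:
--             break
--         left.append(ipt[lo:lo + found])
--         right.append(ipt[hi - found:hi])
--         lo += found
--         hi -= found
--     middle = [ipt[lo:hi]] if hi > lo else []
--     return left + middle + right[::-1]
-- ===== Notes on version B (the rewrite author's own statement) =====
-- stated objective: faster
-- what changed: B precomputes rolling-hash prefix/power tables once and works with indices into the original string, so each prefix==suffix candidate is an O(1) hash comparison (verified by a real compare only on a hash match) instead of A's building and comparing two fresh slices of the shrinking middle per candidate; right parts are collected forward and reversed once.
import Mathlib
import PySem

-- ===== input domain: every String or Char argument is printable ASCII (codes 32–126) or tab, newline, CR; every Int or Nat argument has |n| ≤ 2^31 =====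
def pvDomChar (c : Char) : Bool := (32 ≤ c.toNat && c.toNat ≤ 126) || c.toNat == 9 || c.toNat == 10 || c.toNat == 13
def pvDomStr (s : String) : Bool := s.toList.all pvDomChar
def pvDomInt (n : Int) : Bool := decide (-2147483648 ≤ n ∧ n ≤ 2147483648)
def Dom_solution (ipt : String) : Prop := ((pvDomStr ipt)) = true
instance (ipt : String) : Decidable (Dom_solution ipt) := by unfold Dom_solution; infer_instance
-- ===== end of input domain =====

-- B replaces A's per-round slice-building equality scan by one precomputed rolling-hash table with O(1)
-- hash comparison (verified on match) over indices into the original string; objective: faster.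

-- ===== PORT A =====
-- the inner 'for i in range(1, len(middle)//2+1)' with break: first i whose prefix equals suffix
def innerA (mid : List Char) : List Nat → Option Nat
  | [] => none
  | i :: rest =>
    if mid.take i = mid.drop (mid.length - i) then some i else innerA mid rest

-- the 'while(st)' loop; fuel = len(ipt)+1 always suffices (each found round shortens middle by ≥ 2)
def loopA (fuel : Nat) (mid : List Char) (L R : List (List Char)) : List (List Char) :=
  match fuel with
  | 0 => []  -- unreachable with fuel = len+1
  | fuel + 1 =>
    match innerA mid (List.range' 1 (mid.length / 2)) with
    | some i =>
        loopA fuel ((mid.take (mid.length - i)).drop i)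
          (L ++ [mid.take i]) ([mid.drop (mid.length - i)] ++ R)
    | none => if mid.length > 0 then L ++ [mid] ++ R else L ++ R

def solution (ipt : String) : List String :=
  (loopA (ipt.toList.length + 1) ipt.toList [] []).map String.ofList

-- ===== PORT B =====
-- h.append((h[-1]*BASE + ord(ch)) % MOD) carrying h[-1] as the accumulator (h is never empty)
def buildH : Int → List Char → List Int
  | a, [] => [a]
  | a, c :: cs => a :: buildH (PySem.Int.mod (a * 131 + (c.toNat : Int)) 1000000007) cs

def buildP : Int → List Char → List Int
  | a, [] => [a]
  | a, _ :: cs => a :: buildP (PySem.Int.mod (a * 131) 1000000007) cs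

-- hs(a,b) = (h[b] - h[a]*p[b-a]) % MOD  (indices are always in range)
def hsB (h p : List Int) (a b : Nat) : Int :=
  PySem.Int.mod (h.getD b 0 - h.getD a 0 * p.getD (b - a) 0) 1000000007

-- the 'for i in range(1, (hi-lo)//2+1)' with break: O(1) hash check, slice compare only on hash match
def innerB (s : List Char) (h p : List Int) (lo hi : Nat) : List Nat → Option Nat
  | [] => none
  | i :: rest =>
    if hsB h p lo (lo + i) = hsB h p (hi - i) hi ∧
       (s.drop lo).take i = (s.drop (hi - i)).take i
    then some i else innerB s h p lo hi rest

def loopB (s : List Char) (h p : List Int) (fuel lo hi : Nat)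
    (left right : List (List Char)) : List (List Char) :=
  match fuel with
  | 0 => []  -- unreachable with fuel = len+1
  | fuel + 1 =>
    match innerB s h p lo hi (List.range' 1 ((hi - lo) / 2)) with
    | some i =>
        loopB s h p fuel (lo + i) (hi - i)
          (left ++ [(s.drop lo).take i]) (right ++ [(s.drop (hi - i)).take i])
    | none =>
        left ++ (if lo < hi then [(s.drop lo).take (hi - lo)] else []) ++ right.reverse

def solution_alt (ipt : String) : List String :=
  let s := ipt.toList
  let h := buildH 0 s
  let p := buildP 1 s
  (loopB s h p (s.length + 1) 0 s.length [] []).map String.ofList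

-- ===== PRECONDITION & SPEC =====
def Spec_solution (ipt : String) (out : List String) : Prop := out = solution_alt ipt
instance (ipt : String) (out : List String) : Decidable (Spec_solution ipt out) := by unfold Spec_solution; infer_instance

-- ===== CLAIM (what is proved, stated in full; the proofs are below) =====
def Claim_equal_solution : Prop := ∀ (ipt : String), Dom_solution ipt → Spec_solution ipt (solution ipt)

-- ===== LEMMAS AND PROOFS =====

-- Int-level step functions of the two tables
def stepH (x : Int) (c : Char) : Int := PySem.Int.mod (x * 131 + (c.toNat : Int)) 1000000007
def stepP (x : Int) (_ : Char) : Int := PySem.Int.mod (x * 131) 1000000007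
-- the ideal (un-reduced) polynomial hash, in ZMod
def zstep (x : ZMod 1000000007) (c : Char) : ZMod 1000000007 := x * 131 + (c.toNat : ZMod 1000000007)
def zhash (l : List Char) : ZMod 1000000007 := l.foldl zstep 0

theorem getD_buildH (l : List Char) (a : Int) (k : Nat) (hk : k ≤ l.length) :
    (buildH a l).getD k 0 = (l.take k).foldl stepH a := by
  induction l generalizing a k with
  | nil => obtain rfl := Nat.le_zero.mp hk; simp [buildH]
  | cons c cs ih =>
    cases k with
    | zero => simp [buildH]
    | succ k => simpa [buildH, stepH] using ih _ k (by simpa using hk)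

theorem getD_buildP (l : List Char) (a : Int) (k : Nat) (hk : k ≤ l.length) :
    (buildP a l).getD k 0 = (l.take k).foldl stepP a := by
  induction l generalizing a k with
  | nil => obtain rfl := Nat.le_zero.mp hk; simp [buildP]
  | cons c cs ih =>
    cases k with
    | zero => simp [buildP]
    | succ k => simpa [buildP, stepP] using ih _ k (by simpa using hk)

theorem cast_mod (x : Int) : ((PySem.Int.mod x 1000000007 : Int) : ZMod 1000000007) = (x : ZMod 1000000007) := by
  rw [PySem.Int.mod_eq_emod_of_pos (by norm_num)]
  exact_mod_cast ZMod.intCast_mod x 1000000007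

theorem cast_foldH (l : List Char) (a : Int) :
    ((l.foldl stepH a : Int) : ZMod 1000000007) = l.foldl zstep (a : ZMod 1000000007) := by
  induction l generalizing a with
  | nil => simp
  | cons c cs ih =>
    simp only [List.foldl_cons]
    rw [ih]
    congr 1
    unfold stepH zstep
    rw [cast_mod]
    push_cast
    ring

theorem cast_foldP (l : List Char) (a : Int) :
    ((l.foldl stepP a : Int) : ZMod 1000000007) = (a : ZMod 1000000007) * 131 ^ l.length := by
  induction l generalizing a with
  | nil => simp
  | cons c cs ih =>
    simp only [List.foldl_cons]
    rw [ih]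
    unfold stepP
    rw [cast_mod]
    push_cast
    simp only [List.length_cons]
    ring

theorem zfold_start (l : List Char) (x : ZMod 1000000007) :
    l.foldl zstep x = x * 131 ^ l.length + zhash l := by
  induction l generalizing x with
  | nil => simp [zhash]
  | cons c cs ih =>
    simp only [List.foldl_cons, zhash]
    rw [ih, ih (zstep 0 c)]
    simp only [zstep, List.length_cons]
    ring

-- hsB over the tables of s is, in ZMod, the ideal hash of the slice s[a:b]
theorem hsB_cast (s : List Char) (a b : Nat) (hab : a ≤ b) (hb : b ≤ s.length) :
    ((hsB (buildH 0 s) (buildP 1 s) a b : Int) : ZMod 1000000007)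
      = zhash ((s.drop a).take (b - a)) := by
  have hla : a ≤ s.length := le_trans hab hb
  have hlen : ((s.drop a).take (b - a)).length = b - a := by
    simp [List.length_take, List.length_drop]; omega
  unfold hsB
  rw [cast_mod, getD_buildH s 0 b hb, getD_buildH s 0 a hla,
      getD_buildP s 1 (b - a) (by omega)]
  push_cast
  rw [cast_foldH, cast_foldH, cast_foldP]
  have htk : s.take b = s.take a ++ (s.drop a).take (b - a) := by
    conv_lhs => rw [show b = a + (b - a) by omega]
    rw [List.take_add]
  rw [htk, List.foldl_append, zfold_start, hlen]
  have hlp : ((s.take (b - a)).length) = b - a := by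
    simp [List.length_take]; omega
  rw [hlp]
  push_cast
  ring

-- equal slices give equal hsB values (the only direction B's verified check needs)
theorem hsB_eq_of_slice_eq (s : List Char) (a1 b1 a2 b2 : Nat)
    (h1 : a1 ≤ b1) (h1' : b1 ≤ s.length) (h2 : a2 ≤ b2) (h2' : b2 ≤ s.length)
    (heq : (s.drop a1).take (b1 - a1) = (s.drop a2).take (b2 - a2)) :
    hsB (buildH 0 s) (buildP 1 s) a1 b1 = hsB (buildH 0 s) (buildP 1 s) a2 b2 := by
  have hc : ((hsB (buildH 0 s) (buildP 1 s) a1 b1 : Int) : ZMod 1000000007)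
      = ((hsB (buildH 0 s) (buildP 1 s) a2 b2 : Int) : ZMod 1000000007) := by
    rw [hsB_cast s a1 b1 h1 h1', hsB_cast s a2 b2 h2 h2', heq]
  have hmod := (ZMod.intCast_eq_intCast_iff _ _ _).mp hc
  have hb1 : 0 ≤ hsB (buildH 0 s) (buildP 1 s) a1 b1 ∧ hsB (buildH 0 s) (buildP 1 s) a1 b1 < 1000000007 :=
    ⟨PySem.Int.mod_nonneg _ (by norm_num), PySem.Int.mod_lt _ (by norm_num)⟩
  have hb2 : 0 ≤ hsB (buildH 0 s) (buildP 1 s) a2 b2 ∧ hsB (buildH 0 s) (buildP 1 s) a2 b2 < 1000000007 :=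
    ⟨PySem.Int.mod_nonneg _ (by norm_num), PySem.Int.mod_lt _ (by norm_num)⟩
  have := Int.ModEq.dvd hmod
  omega

-- A's prefix/suffix test on middle = s[lo:hi] is the slice test on the original string
theorem slice_take (s : List Char) (lo hi i : Nat) (h2i : lo + i + i ≤ hi) :
    ((s.drop lo).take (hi - lo)).take i = (s.drop lo).take i := by
  rw [List.take_take]
  congr 1
  omega

theorem slice_drop (s : List Char) (lo hi i : Nat) (_hi2 : hi ≤ s.length) (h2i : lo + i + i ≤ hi) :
    ((s.drop lo).take (hi - lo)).drop (((s.drop lo).take (hi - lo)).length - i)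
      = (s.drop (hi - i)).take i := by
  have hlen : ((s.drop lo).take (hi - lo)).length = hi - lo := by
    simp [List.length_take, List.length_drop]; omega
  rw [hlen, List.drop_take, List.drop_drop]
  have e1 : hi - lo - (hi - lo - i) = i := by omega
  have e2 : lo + (hi - lo - i) = hi - i := by omega
  rw [e1, e2]

-- the two inner scans agree on any candidate list that stays in range
theorem inner_eq (s : List Char) (lo hi : Nat) (hhi : hi ≤ s.length) :
    ∀ cand : List Nat, (∀ i ∈ cand, 1 ≤ i ∧ lo + i + i ≤ hi) →
      innerB s (buildH 0 s) (buildP 1 s) lo hi cand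
        = innerA ((s.drop lo).take (hi - lo)) cand := by
  intro cand
  induction cand with
  | nil => exact fun _ => rfl
  | cons i rest ih =>
    intro hc
    obtain ⟨hi1, h2i⟩ := hc i (by simp)
    have hsl : ((s.drop lo).take (hi - lo)).take i = (s.drop lo).take i :=
      slice_take s lo hi i h2i
    have hsr := slice_drop s lo hi i hhi h2i
    have hcond : (hsB (buildH 0 s) (buildP 1 s) lo (lo + i) = hsB (buildH 0 s) (buildP 1 s) (hi - i) hi ∧
        (s.drop lo).take i = (s.drop (hi - i)).take i)
        ↔ ((s.drop lo).take (hi - lo)).take i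
            = ((s.drop lo).take (hi - lo)).drop (((s.drop lo).take (hi - lo)).length - i) := by
    -- slice equality implies hash equality, so the conjunction collapses to the slice test
      rw [hsl, hsr]
      constructor
      · exact fun h => h.2
      · intro h
        refine ⟨?_, h⟩
        have := hsB_eq_of_slice_eq s lo (lo + i) (hi - i) hi
          (by omega) (by omega) (by omega) (by omega)
        apply this
        simpa [Nat.add_sub_cancel_left, Nat.sub_sub_self, show lo + i - lo = i by omega,
          show hi - (hi - i) = i by omega] using h
    simp only [innerB, innerA]
    split_ifs with hA hB hB
    · rfl
    · exact absurd (hcond.mp hA) hB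
    · exact absurd (hcond.mpr hB) hA
    · exact ih (fun j hj => hc j (by simp [hj]))

theorem range'_bounds (lo hi : Nat) : ∀ i ∈ List.range' 1 ((hi - lo) / 2), 1 ≤ i ∧ lo + i + i ≤ hi := by
  intro i hi'
  rw [List.mem_range'] at hi'
  obtain ⟨k, hk, rfl⟩ := hi'
  omega

theorem loop_eq (s : List Char) : ∀ (fuel lo hi : Nat) (L rB : List (List Char)),
    lo ≤ hi → hi ≤ s.length →
    loopA fuel ((s.drop lo).take (hi - lo)) L rB.reverse
      = loopB s (buildH 0 s) (buildP 1 s) fuel lo hi L rB := by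
  intro fuel
  induction fuel with
  | zero => intro lo hi L rB _ _; rfl
  | succ fuel ih =>
    intro lo hi L rB hlo hhi
    have hlen : ((s.drop lo).take (hi - lo)).length = hi - lo := by
      simp [List.length_take, List.length_drop]; omega
    have hinner := inner_eq s lo hi hhi (List.range' 1 ((hi - lo) / 2)) (range'_bounds lo hi)
    simp only [loopA, loopB, hlen]
    rw [← hinner]
    cases hfind : innerB s (buildH 0 s) (buildP 1 s) lo hi (List.range' 1 ((hi - lo) / 2)) with
    | none =>
      by_cases hml : lo < hi
      · simp [show hi - lo > 0 by omega, hml]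
      · simp [show ¬ (hi - lo > 0) by omega, hml]
    | some i =>
      -- extract the range bounds for the found i
      have hib : 1 ≤ i ∧ lo + i + i ≤ hi := by
        have : ∀ cand : List Nat, (∀ j ∈ cand, 1 ≤ j ∧ lo + j + j ≤ hi) →
            innerB s (buildH 0 s) (buildP 1 s) lo hi cand = some i → 1 ≤ i ∧ lo + i + i ≤ hi := by
          intro cand
          induction cand with
          | nil => intro _ h; simp [innerB] at h
          | cons j rest ihc =>
            intro hc h
            simp only [innerB] at h
            split_ifs at h with hj
            · cases h; exact hc i (by simp)
            · exact ihc (fun k hk => hc k (by simp [hk])) h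
        exact this _ (range'_bounds lo hi) hfind
      obtain ⟨hi1, h2i⟩ := hib
      dsimp only
      have e1 : ((s.drop lo).take (hi - lo)).take i = (s.drop lo).take i :=
        slice_take s lo hi i h2i
      have e2 : ((s.drop lo).take (hi - lo)).drop (hi - lo - i) = (s.drop (hi - i)).take i := by
        have := slice_drop s lo hi i hhi h2i
        rwa [hlen] at this
      have e3 : (((s.drop lo).take (hi - lo)).take (hi - lo - i)).drop i
          = (s.drop (lo + i)).take (hi - i - (lo + i)) := by
        rw [List.take_take, show min (hi - lo - i) (hi - lo) = hi - lo - i by omega,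
            List.drop_take, List.drop_drop]
        congr 1
        omega
      rw [e1, e2, e3]
      have hrev : [(s.drop (hi - i)).take i] ++ rB.reverse
          = (rB ++ [(s.drop (hi - i)).take i]).reverse := by simp
      rw [hrev, ih (lo + i) (hi - i) (L ++ [(s.drop lo).take i]) (rB ++ [(s.drop (hi - i)).take i])
        (by omega) (by omega)]

-- ===== VERDICT (by name: the statement is the Claim_ definition above) =====
theorem solution_spec : Claim_equal_solution := by
  intro ipt _
  unfold Spec_solution solution solution_alt
  have h := loop_eq ipt.toList (ipt.toList.length + 1) 0 ipt.toList.length [] [] (by omega) le_rfl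
  simp only [List.drop_zero, Nat.sub_zero, List.take_length, List.reverse_nil] at h
  rw [h]
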